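-- pv_equiv track=rewrite | github.com/Ari-KoolKat/LeetCode2025 | 1694-make-sum-divisible-by-p/make-sum-divisible-by-p.py | minimumSubArraySumEqualsK
-- ===== SOURCE A (Python) =====
-- def minimumSubArraySumEqualsK(nums, k, p):
--     n = len(nums)
--     mp = {0: -1}  # prefix_mod -> index
--     prefix = 0
--     min_len = float('inf')
--
--     for i, num in enumerate(nums):
--         prefix = (prefix + num) % p
--         remain = (prefix - k + p) % p
--
--         if remain in mp:
--             min_len = min(min_len, i - mp[remain])
--
--         mp[prefix] = i
--
--     if min_len == n:
--         return -1
--     return -1 if min_len == float('inf') else min_len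
-- ===== SOURCE B (Python) =====
-- def minimumSubArraySumEqualsK(nums, k, p):
--     n = len(nums)
--     # canonical prefix sums mod p: pref[t] = sum(nums[:t]) % p
--     pref = [0]
--     for x in nums:
--         pref.append((pref[-1] + x) % p)
--     best = n + 1  # sentinel: no qualifying subarray found yet
--     for i in range(1, n + 1):
--         target = (pref[i] - k) % p
--         for j in range(i):
--             if pref[j] == target:
--                 if i - j < best:
--                     best = i - j
--     return best if best < n else -1
-- ===== Notes on version B (the rewrite author's own statement) =====
-- stated objective: alternative
-- what changed: Replaced the single hashed pass (dict of last prefix-residue indices) by an explicit prefix-sum array plus a double loop over all (j,i) prefix pairs taking the minimum qualifying length, with the same final can't-remove-whole-array rule.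
import Mathlib
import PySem

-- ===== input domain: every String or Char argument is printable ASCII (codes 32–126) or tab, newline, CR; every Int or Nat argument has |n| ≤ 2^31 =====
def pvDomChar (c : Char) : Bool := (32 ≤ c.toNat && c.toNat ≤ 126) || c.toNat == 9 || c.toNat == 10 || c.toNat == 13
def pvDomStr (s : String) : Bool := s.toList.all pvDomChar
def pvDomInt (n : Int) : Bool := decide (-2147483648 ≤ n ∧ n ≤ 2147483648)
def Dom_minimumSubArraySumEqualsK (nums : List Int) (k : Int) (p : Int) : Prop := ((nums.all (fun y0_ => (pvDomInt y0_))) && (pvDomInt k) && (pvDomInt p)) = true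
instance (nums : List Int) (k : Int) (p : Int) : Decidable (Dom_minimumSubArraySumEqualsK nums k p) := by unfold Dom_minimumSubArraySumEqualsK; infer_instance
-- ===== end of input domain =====

-- B replaces A's single hashed pass (dict of last prefix-residue indices) by a prefix-sum
-- array plus a brute-force double loop over all prefix pairs (alternative decomposition).

-- ===== PORT A =====
-- loop body of A; state: (mp : dict prefix-residue -> index, prefix, min_len),
-- min_len = none models float('inf')
def pvAStep (k p : Int) (st : PySem.Dict Int Int × Int × Option Int) (iv : Int × Int) :
    PySem.Dict Int Int × Int × Option Int :=
  let mp := st.1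
  let pfx := PySem.Int.mod (st.2.1 + iv.2) p
  let remain := PySem.Int.mod (pfx - k + p) p
  let minLen : Option Int :=
    match mp.get? remain with
    | some j =>
        match st.2.2 with
        | none => some (iv.1 - j)
        | some m => some (min m (iv.1 - j))
    | none => st.2.2
  (mp.insert pfx iv.1, pfx, minLen)

def minimumSubArraySumEqualsK (nums : List Int) (k : Int) (p : Int) : Int :=
  let n : Int := nums.length
  let st := (PySem.List.enumerate nums).foldl (pvAStep k p)
    ((PySem.Dict.empty).insert 0 (-1), 0, none)
  match st.2.2 with
  | none => -1
  | some m => if m = n then -1 else m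

-- ===== PORT B =====
-- inner loop body of B: scan j, keep the smallest qualifying length i - j
def pvBInnerStep (pref : List Int) (target i : Int) (best j : Int) : Int :=
  if PySem.List.pyGetD pref j 0 = target then if i - j < best then i - j else best else best

-- outer loop body of B: row i checks all j < i
def pvBOuterStep (pref : List Int) (k p : Int) (best i : Int) : Int :=
  let target := PySem.Int.mod (PySem.List.pyGetD pref i 0 - k) p
  (PySem.List.pyRange 0 i).foldl (pvBInnerStep pref target i) best

def minimumSubArraySumEqualsK_alt (nums : List Int) (k : Int) (p : Int) : Int :=
  let n := nums.length
  let pref : List Int := List.scanl (fun a x => PySem.Int.mod (a + x) p) 0 nums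
  let best : Int :=
    (PySem.List.pyRange 1 ((n : Int) + 1)).foldl (pvBOuterStep pref k p) ((n : Int) + 1)
  if best < (n : Int) then best else -1

-- ===== PRECONDITION & SPEC =====
-- Pre_ excludes exactly p = 0, on which Python's '%' raises ZeroDivisionError in both programs.
def Pre_minimumSubArraySumEqualsK (nums : List Int) (k : Int) (p : Int) : Prop := p ≠ 0
instance (nums : List Int) (k : Int) (p : Int) : Decidable (Pre_minimumSubArraySumEqualsK nums k p) := by unfold Pre_minimumSubArraySumEqualsK; infer_instance
def pvWitness_minimumSubArraySumEqualsK : List Int × Int × Int := ([1, 2, 3], 1, 5)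

def Spec_minimumSubArraySumEqualsK (nums : List Int) (k : Int) (p : Int) (out : Int) : Prop := out = minimumSubArraySumEqualsK_alt nums k p
instance (nums : List Int) (k : Int) (p : Int) (out : Int) : Decidable (Spec_minimumSubArraySumEqualsK nums k p out) := by unfold Spec_minimumSubArraySumEqualsK; infer_instance

-- ===== CLAIM (what is proved, stated in full; the proofs are below) =====
def Claim_equal_minimumSubArraySumEqualsK : Prop := ∀ (nums : List Int) (k : Int) (p : Int), Dom_minimumSubArraySumEqualsK nums k p → Pre_minimumSubArraySumEqualsK nums k p → Spec_minimumSubArraySumEqualsK nums k p (minimumSubArraySumEqualsK nums k p)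

-- ===== LEMMAS AND PROOFS =====

def pvC (p x : Int) : Int := PySem.Int.mod x p

theorem pvC_congr (p a b : Int) (hp : p ≠ 0) (h : p ∣ a - b) : pvC p a = pvC p b := by
  have ha := PySem.Int.floordiv_mul_add_mod a p
  have hb := PySem.Int.floordiv_mul_add_mod b p
  obtain ⟨c, hc⟩ := h
  have hdvd : p ∣ PySem.Int.mod a p - PySem.Int.mod b p :=
    ⟨c - PySem.Int.floordiv a p + PySem.Int.floordiv b p, by linear_combination hc + ha - hb⟩
  have habs : |PySem.Int.mod a p - PySem.Int.mod b p| < |p| := by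
    rcases lt_or_gt_of_ne hp with hneg | hpos
    · have b1 := PySem.Int.mod_neg_bounds a hneg
      have b2 := PySem.Int.mod_neg_bounds b hneg
      rw [abs_lt, abs_of_neg hneg]; omega
    · have b1 := PySem.Int.mod_nonneg a hpos
      have b2 := PySem.Int.mod_nonneg b hpos
      have c1 := PySem.Int.mod_lt a hpos
      have c2 := PySem.Int.mod_lt b hpos
      rw [abs_lt, abs_of_pos hpos]; omega
  have hz : PySem.Int.mod a p - PySem.Int.mod b p = 0 :=
    Int.eq_zero_of_abs_lt_dvd ((abs_dvd p _).mpr hdvd) habs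
  simp only [pvC]; omega

theorem pvC_add_left (p a b : Int) (hp : p ≠ 0) : pvC p (pvC p a + b) = pvC p (a + b) := by
  apply pvC_congr _ _ _ hp
  have ha := PySem.Int.floordiv_mul_add_mod a p
  exact ⟨-PySem.Int.floordiv a p, by simp only [pvC]; linear_combination ha⟩

theorem pvC_sub_left (p a b : Int) (hp : p ≠ 0) : pvC p (pvC p a - b) = pvC p (a - b) := by
  apply pvC_congr _ _ _ hp
  have ha := PySem.Int.floordiv_mul_add_mod a p
  exact ⟨-PySem.Int.floordiv a p, by simp only [pvC]; linear_combination ha⟩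

theorem pvC_add_p (p a : Int) (hp : p ≠ 0) : pvC p (a + p) = pvC p a := by
  exact pvC_congr p _ _ hp ⟨1, by ring⟩

theorem pvC_zero (p : Int) : pvC p 0 = 0 := by
  simp only [pvC]; exact (PySem.Int.mod_eq_zero_iff_dvd 0 p).mpr (dvd_zero p)

def pvS (nums : List Int) (t : Nat) : Int := (nums.take t).sum

def pvLGm (nums : List Int) (k p : Int) (i m : Nat) : Option Nat :=
  (List.range m).foldl
    (fun acc j => if pvC p (pvS nums j) = pvC p (pvS nums i - k) then some j else acc) none

def pvLG (nums : List Int) (k p : Int) (i : Nat) : Option Nat := pvLGm nums k p i i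

def pvRef (nums : List Int) (k p : Int) : Nat → Option Int
  | 0 => none
  | t + 1 =>
    match (pvLG nums k p (t + 1)).map (fun j : Nat => ((t : Int) + 1) - (j : Int)) with
    | none => pvRef nums k p t
    | some v =>
      some (match pvRef nums k p t with
            | none => v
            | some m => min m v)

theorem pvLastFold_mem {P : Nat → Prop} [DecidablePred P] (l : List Nat) (m0 : Option Nat) (j : Nat)
    (h : l.foldl (fun m j => if P j then some j else m) m0 = some j) : m0 = some j ∨ j ∈ l := by
  induction l generalizing m0 with
  | nil => exact Or.inl h
  | cons x xs ih =>
    rcases ih _ h with h' | h'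
    · by_cases hx : P x
      · simp [hx] at h'; exact Or.inr (by simp [h'])
      · simp [hx] at h'; exact Or.inl h'
    · exact Or.inr (List.mem_cons_of_mem _ h')

theorem pvLGm_lt (nums : List Int) (k p : Int) (i m j : Nat)
    (h : pvLGm nums k p i m = some j) : j < m := by
  rcases pvLastFold_mem _ _ _ h with h' | h'
  · cases h'
  · exact List.mem_range.mp h'

theorem pvRef_bounds (nums : List Int) (k p : Int) (t : Nat) (m : Int)
    (h : pvRef nums k p t = some m) : 1 ≤ m ∧ m ≤ (t : Int) := by
  induction t generalizing m with
  | zero => simp [pvRef] at h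
  | succ t ih =>
    rw [pvRef] at h
    cases hlg : pvLG nums k p (t + 1) with
    | none =>
      rw [hlg] at h; simp at h
      have := ih m h; omega
    | some j =>
      have hj : j < t + 1 := pvLGm_lt _ _ _ _ _ _ hlg
      rw [hlg] at h; simp at h
      cases href : pvRef nums k p t with
      | none => rw [href] at h; simp at h; omega
      | some mm =>
        have := ih mm href
        rw [href] at h; simp at h
        rw [min_def] at h; split_ifs at h <;> omega

theorem pvScanl_getD {α β : Type} (f : β → α → β) (xs : List α) (b d : β) (t : Nat)
    (ht : t ≤ xs.length) : (List.scanl f b xs).getD t d = (xs.take t).foldl f b := by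
  induction xs generalizing b t with
  | nil =>
    have : t = 0 := by simpa using ht
    subst this; simp [List.scanl]
  | cons x xs ih =>
    cases t with
    | zero => simp [List.scanl]
    | succ t => simpa [List.scanl] using ih (f b x) t (by simpa using ht)

theorem pvFoldl_mod (p : Int) (hp : p ≠ 0) (xs : List Int) (a : Int) :
    xs.foldl (fun a x => PySem.Int.mod (a + x) p) (pvC p a) = pvC p (a + xs.sum) := by
  induction xs generalizing a with
  | nil => simp
  | cons x xs ih =>
    have : PySem.Int.mod (pvC p a + x) p = pvC p (a + x) := pvC_add_left p a x hp
    simp only [List.foldl_cons, this, ih (a + x), List.sum_cons]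
    ring_nf

theorem pvPref_getD (nums : List Int) (p : Int) (hp : p ≠ 0) (t : Nat) (ht : t ≤ nums.length) :
    (List.scanl (fun a x => PySem.Int.mod (a + x) p) 0 nums).getD t 0 = pvC p (pvS nums t) := by
  rw [pvScanl_getD _ _ _ _ _ ht]
  have h0 : (0 : Int) = pvC p 0 := (pvC_zero p).symm
  rw [h0, pvFoldl_mod p hp]
  simp [pvS]

def pvLP (nums : List Int) (p : Int) (t : Nat) (r : Int) : Option Int :=
  (List.range (t + 1)).foldl
    (fun m j => if pvC p (pvS nums j) = r then some ((j : Int) - 1) else m) none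

theorem pvLastFold_map {P : Nat → Prop} [DecidablePred P] (f : Nat → Int) (l : List Nat) :
    ∀ (m0 : Option Nat),
    (l.foldl (fun m j => if P j then some j else m) m0).map f
      = l.foldl (fun m j => if P j then some (f j) else m) (m0.map f) := by
  induction l with
  | nil => intro m0; rfl
  | cons x xs ih =>
    intro m0
    simp only [List.foldl_cons]
    rw [ih]
    congr 1
    by_cases hx : P x <;> simp [hx]

theorem pvLP_LG (nums : List Int) (k p : Int) (t : Nat) :
    pvLP nums p t (pvC p (pvS nums (t + 1) - k))
      = (pvLG nums k p (t + 1)).map (fun j : Nat => ((j : Int) - 1)) := by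
  rw [pvLG, pvLGm, pvLastFold_map]
  rfl

theorem pvLP_succ (nums : List Int) (p : Int) (t : Nat) (r : Int) :
    pvLP nums p (t + 1) r
      = if pvC p (pvS nums (t + 1)) = r then some (((t + 1 : Nat) : Int) - 1)
        else pvLP nums p t r := by
  show (List.range (t + 1 + 1)).foldl _ none = _
  rw [List.range_succ, List.foldl_append]
  rfl

theorem pvAloop (nums : List Int) (k p : Int) (hp : p ≠ 0) (rest : List Int) :
    ∀ (t : Nat) (mp : PySem.Dict Int Int) (ml : Option Int),
    nums.drop t = rest →
    (∀ r, mp.get? r = pvLP nums p t r) →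
    ml = pvRef nums k p t →
    ((PySem.List.enumerate rest (t : Int)).foldl (pvAStep k p)
        (mp, pvC p (pvS nums t), ml)).2.2
      = pvRef nums k p (t + rest.length) := by
  induction rest with
  | nil =>
    intro t mp ml _ _ hml
    simpa [PySem.List.enumerate] using hml
  | cons x rs ih =>
    intro t mp ml hdrop hmp hml
    subst hml
    have htlen : t < nums.length := by
      have := congrArg List.length hdrop
      simp at this; omega
    have hx : nums[t] = x := by
      have h1 : (nums.drop t)[0]? = some x := by rw [hdrop]; rfl
      rw [List.getElem?_drop] at h1
      simp only [Nat.add_zero] at h1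
      rw [List.getElem?_eq_getElem htlen] at h1
      exact Option.some.inj h1
    have hS : pvS nums (t + 1) = pvS nums t + x := by
      rw [pvS, pvS, List.sum_take_succ nums t htlen, hx]
    have hpfx : PySem.Int.mod (pvC p (pvS nums t) + x) p = pvC p (pvS nums (t + 1)) := by
      have := pvC_add_left p (pvS nums t) x hp
      rw [hS]
      simpa [pvC] using this
    have hremain : PySem.Int.mod (pvC p (pvS nums (t + 1)) - k + p) p
        = pvC p (pvS nums (t + 1) - k) := by
      have h1 := pvC_add_p p (pvC p (pvS nums (t + 1)) - k) hp
      have h2 := pvC_sub_left p (pvS nums (t + 1)) k hp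
      calc PySem.Int.mod (pvC p (pvS nums (t + 1)) - k + p) p
          = pvC p (pvC p (pvS nums (t + 1)) - k + p) := rfl
        _ = pvC p (pvC p (pvS nums (t + 1)) - k) := h1
        _ = pvC p (pvS nums (t + 1) - k) := h2
    have hget : mp.get? (pvC p (pvS nums (t + 1) - k))
        = (pvLG nums k p (t + 1)).map (fun j : Nat => ((j : Int) - 1)) := by
      rw [hmp, pvLP_LG]
    have hml' :
        (match mp.get? (pvC p (pvS nums (t + 1) - k)) with
          | some j =>
              (match pvRef nums k p t with
                | none => some ((t : Int) - j)
                | some m => some (min m ((t : Int) - j)) : Option Int)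
          | none => pvRef nums k p t)
        = pvRef nums k p (t + 1) := by
      rw [hget]
      cases hlg : pvLG nums k p (t + 1) with
      | none => simp [pvRef, hlg]
      | some j =>
        have harith : (t : Int) - ((j : Int) - 1) = ((t : Int) + 1) - (j : Int) := by ring
        cases href : pvRef nums k p t with
        | none => simp [pvRef, hlg, href, harith]
        | some m => simp [pvRef, hlg, href, harith]
    have hmp' : ∀ r, (mp.insert (pvC p (pvS nums (t + 1))) (t : Int)).get? r
        = pvLP nums p (t + 1) r := by
      intro r
      rw [PySem.Dict.get?_insert, pvLP_succ]
      by_cases hr : r = pvC p (pvS nums (t + 1))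
      · rw [if_pos hr, if_pos hr.symm]
        congr 1
        push_cast
        ring
      · rw [if_neg hr, if_neg (fun h => hr h.symm), hmp]
    have hdrop' : nums.drop (t + 1) = rs := by
      rw [← List.tail_drop, hdrop]
      rfl
    have hcast : (t : Int) + 1 = ((t + 1 : Nat) : Int) := by push_cast; ring
    rw [PySem.List.enumerate_cons, List.foldl_cons]
    have hstep : pvAStep k p (mp, pvC p (pvS nums t), pvRef nums k p t) ((t : Int), x)
        = (mp.insert (pvC p (pvS nums (t + 1))) (t : Int), pvC p (pvS nums (t + 1)),
           pvRef nums k p (t + 1)) := by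
      simp only [pvAStep, hpfx, hremain]
      exact congrArg _ (congrArg _ hml')
    rw [hstep, hcast, ih (t + 1) _ _ hdrop' hmp' rfl]
    congr 1
    simp only [List.length_cons]
    omega

theorem pvLGm_succ (nums : List Int) (k p : Int) (i m : Nat) :
    pvLGm nums k p i (m + 1)
      = if pvC p (pvS nums m) = pvC p (pvS nums i - k) then some m else pvLGm nums k p i m := by
  show (List.range (m + 1)).foldl _ none = _
  rw [List.range_succ, List.foldl_append]
  rfl

theorem pvBinnerAux (nums : List Int) (k p : Int) (iN : Nat) (m : Nat) (hm : m ≤ iN) (b : Int) :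
    (List.range m).foldl
      (fun b (j : Nat) =>
        if pvC p (pvS nums j) = pvC p (pvS nums iN - k) then
          (if (iN : Int) - (j : Int) < b then (iN : Int) - (j : Int) else b)
        else b) b
      = match pvLGm nums k p iN m with
        | none => b
        | some j => min b ((iN : Int) - (j : Int)) := by
  induction m with
  | zero => simp [pvLGm]
  | succ m ih =>
    rw [List.range_succ, List.foldl_append, ih (by omega), pvLGm_succ]
    by_cases hc : pvC p (pvS nums m) = pvC p (pvS nums iN - k)
    · rw [if_pos hc]
      cases hlg : pvLGm nums k p iN m with
      | none => simp only [List.foldl_cons, List.foldl_nil, if_pos hc]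
                rw [min_def]; split_ifs <;> omega
      | some j0 =>
        have hj0 : j0 < m := pvLGm_lt _ _ _ _ _ _ hlg
        have hjm : (iN : Int) - (m : Int) < (iN : Int) - (j0 : Int) := by
          have : (j0 : Int) < (m : Int) := by exact_mod_cast hj0
          omega
        simp only [List.foldl_cons, List.foldl_nil, if_pos hc]
        rw [min_def, min_def]; split_ifs <;> omega
    · rw [if_neg hc]
      cases hlg : pvLGm nums k p iN m <;>
        simp only [List.foldl_cons, List.foldl_nil, if_neg hc]

theorem pvBinner (nums : List Int) (k p : Int) (hp : p ≠ 0) (iN : Nat)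
    (hi : iN ≤ nums.length) (b : Int) :
    (PySem.List.pyRange 0 (iN : Int)).foldl
      (pvBInnerStep (List.scanl (fun a x => PySem.Int.mod (a + x) p) 0 nums)
        (PySem.Int.mod
          (PySem.List.pyGetD (List.scanl (fun a x => PySem.Int.mod (a + x) p) 0 nums) (iN : Int) 0 - k) p)
        (iN : Int)) b
      = match pvLG nums k p iN with
        | none => b
        | some j => min b ((iN : Int) - (j : Int)) := by
  have htarget : PySem.Int.mod
      (PySem.List.pyGetD (List.scanl (fun a x => PySem.Int.mod (a + x) p) 0 nums) (iN : Int) 0 - k) p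
      = pvC p (pvS nums iN - k) := by
    rw [PySem.List.pyGetD_natCast, pvPref_getD nums p hp iN hi]
    exact pvC_sub_left p _ k hp
  rw [htarget, PySem.List.pyRange_zero_natCast, List.foldl_map]
  have hstep : ∀ (b : Int) (j : Nat), j ∈ List.range iN →
      pvBInnerStep (List.scanl (fun a x => PySem.Int.mod (a + x) p) 0 nums)
        (pvC p (pvS nums iN - k)) (iN : Int) b (j : Int)
      = (if pvC p (pvS nums j) = pvC p (pvS nums iN - k) then
          (if (iN : Int) - (j : Int) < b then (iN : Int) - (j : Int) else b)
        else b) := by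
    intro b j hj
    have hjlt : j ≤ nums.length := by
      have := List.mem_range.mp hj; omega
    rw [pvBInnerStep, PySem.List.pyGetD_natCast, pvPref_getD nums p hp j hjlt]
  rw [PySem.List.foldl_congr_mem _ _ _ _ hstep]
  exact pvBinnerAux nums k p iN iN (le_refl _) b

theorem pvBouter (nums : List Int) (k p : Int) (hp : p ≠ 0) (m : Nat) (hm : m ≤ nums.length) :
    (PySem.List.pyRange 1 ((m : Int) + 1)).foldl
      (pvBOuterStep (List.scanl (fun a x => PySem.Int.mod (a + x) p) 0 nums) k p)
      (((nums.length : Int)) + 1)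
      = match pvRef nums k p m with
        | none => (nums.length : Int) + 1
        | some v => min ((nums.length : Int) + 1) v := by
  induction m with
  | zero =>
    show (PySem.List.pyRange 1 (((0 : Nat) : Int) + 1)).foldl _ _ = _
    norm_num [pvRef]
  | succ m ih =>
    have hm' : m ≤ nums.length := by omega
    have hcast : ((m + 1 : Nat) : Int) + 1 = ((m : Int) + 1) + 1 := by push_cast; ring
    rw [hcast, PySem.List.pyRange_one_succ_right (by omega), List.foldl_append,
        ih hm', List.foldl_cons, List.foldl_nil]
    have hcast2 : ((m : Int) + 1) = ((m + 1 : Nat) : Int) := by push_cast; ring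
    rw [pvBOuterStep, hcast2]
    rw [pvBinner nums k p hp (m + 1) (by omega)]
    cases hlg : pvLG nums k p (m + 1) with
    | none =>
      cases href : pvRef nums k p m with
      | none => simp [pvRef, hlg, href]
      | some v => simp [pvRef, hlg, href]
    | some j =>
      have hv : ((m + 1 : Nat) : Int) - (j : Int) = ((m : Int) + 1) - (j : Int) := by
        push_cast; ring
      cases href : pvRef nums k p m with
      | none => simp [pvRef, hlg, href]
      | some v => simp [pvRef, hlg, href, min_assoc]

theorem pvA_char (nums : List Int) (k p : Int) (hp : p ≠ 0) :
    minimumSubArraySumEqualsK nums k p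
      = (match pvRef nums k p nums.length with
         | none => -1
         | some m => if m = (nums.length : Int) then -1 else m) := by
  have hmp0 : ∀ r, ((PySem.Dict.empty).insert (0 : Int) (-1 : Int)).get? r = pvLP nums p 0 r := by
    intro r
    rw [PySem.Dict.get?_insert]
    show _ = (List.range 1).foldl _ none
    simp only [List.range_one, List.foldl_cons, List.foldl_nil]
    have h0 : pvC p (pvS nums 0) = 0 := by
      have : pvS nums 0 = 0 := by simp [pvS]
      rw [this]; exact pvC_zero p
    rw [h0]
    by_cases hr : r = 0
    · rw [if_pos hr, if_pos hr.symm]; norm_num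
    · rw [if_neg hr, if_neg (fun h => hr h.symm)]
      simp [PySem.Dict.get?_empty]
  have h00 : pvC p (pvS nums 0) = 0 := by
    have : pvS nums 0 = 0 := by simp [pvS]
    rw [this]; exact pvC_zero p
  have hloop := pvAloop nums k p hp nums 0 ((PySem.Dict.empty).insert 0 (-1)) none
    (by simp) hmp0 (by simp [pvRef])
  rw [h00] at hloop
  simp only [Nat.cast_zero, Nat.zero_add] at hloop
  show (match (List.foldl (pvAStep k p) (PySem.Dict.empty.insert 0 (-1), 0, none) (PySem.List.enumerate nums)).2.2 with
    | none => (-1 : Int)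
    | some m => if m = (nums.length : Int) then -1 else m) = _
  rw [hloop]

theorem pvB_char (nums : List Int) (k p : Int) (hp : p ≠ 0) :
    minimumSubArraySumEqualsK_alt nums k p
      = (match pvRef nums k p nums.length with
         | none => -1
         | some m => if m = (nums.length : Int) then -1 else m) := by
  show (if (List.foldl (pvBOuterStep (List.scanl (fun a x => PySem.Int.mod (a + x) p) 0 nums) k p) ((nums.length : Int) + 1) (PySem.List.pyRange 1 ((nums.length : Int) + 1))) < (nums.length : Int)
      then (List.foldl (pvBOuterStep (List.scanl (fun a x => PySem.Int.mod (a + x) p) 0 nums) k p) ((nums.length : Int) + 1) (PySem.List.pyRange 1 ((nums.length : Int) + 1))) else -1) = _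
  rw [pvBouter nums k p hp nums.length (le_refl _)]
  cases href : pvRef nums k p nums.length with
  | none =>
    show (if ((nums.length : Int) + 1) < (nums.length : Int) then ((nums.length : Int) + 1) else -1) = (-1 : Int)
    rw [if_neg (by omega)]
  | some m =>
    obtain ⟨h1, h2⟩ := pvRef_bounds nums k p nums.length m href
    show (if (min ((nums.length : Int) + 1) m) < (nums.length : Int) then min ((nums.length : Int) + 1) m else -1)
        = (if m = (nums.length : Int) then -1 else m)
    rw [min_eq_right (by omega)]
    by_cases hmn : m = (nums.length : Int)
    · rw [if_neg (by omega), if_pos hmn]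
    · rw [if_pos (by omega), if_neg hmn]

-- ===== VERDICT (by name: the statement is the Claim_ definition above) =====
theorem minimumSubArraySumEqualsK_spec : Claim_equal_minimumSubArraySumEqualsK := by
  intro nums k p _ hp
  unfold Spec_minimumSubArraySumEqualsK
  rw [pvA_char nums k p hp, pvB_char nums k p hp]
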